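-- pv_equiv track=rewrite | github.com/foodnotfit/quantum-playground | password_cracker.py | _compute_charset_size
-- ===== SOURCE A (Python) =====
-- import string
--
-- def _compute_charset_size(password):
--     """Compute the character space size based on character types present."""
--     charset_size = 0
--     has_lower = any(c.islower() for c in password)
--     has_upper = any(c.isupper() for c in password)
--     has_digit = any(c.isdigit() for c in password)
--     has_special = any(c in string.punctuation for c in password)
--     has_space = " " in password
--
--     if has_lower:   charset_size += 26
--     if has_upper:   charset_size += 26
--     if has_digit:   charset_size += 10
--     if has_special: charset_size += 32
--     if has_space:   charset_size += 1  # space is predictable but adds a bit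
--
--     if charset_size == 0:
--         charset_size = 26  # fallback for weird chars (unicode etc)
--     return charset_size
-- ===== SOURCE B (Python) =====
-- import string
--
-- _SIZES = [26, 26, 10, 32, 1]  # lower, upper, digit, special, space
--
-- def _char_classes(c):
--     ks = []
--     if c.islower(): ks.append(0)
--     if c.isupper(): ks.append(1)
--     if c.isdigit(): ks.append(2)
--     if c in string.punctuation: ks.append(3)
--     if c == " ": ks.append(4)
--     return ks
--
-- def _compute_charset_size(password):
--     """Compute the character space size based on character types present."""
--     present = set()
--     for c in password:
--         present.update(_char_classes(c))
--     size = sum(_SIZES[k] for k in present)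
--     return size if size else 26
-- ===== Notes on version B (the rewrite author's own statement) =====
-- stated objective: alternative
-- what changed: B is data-driven: it classifies each character into category ids via a helper, accumulates the SET of categories present, and sums the sizes from a lookup table, instead of A's five independent whole-string scans feeding an if-chain of += constants.
import Mathlib
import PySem

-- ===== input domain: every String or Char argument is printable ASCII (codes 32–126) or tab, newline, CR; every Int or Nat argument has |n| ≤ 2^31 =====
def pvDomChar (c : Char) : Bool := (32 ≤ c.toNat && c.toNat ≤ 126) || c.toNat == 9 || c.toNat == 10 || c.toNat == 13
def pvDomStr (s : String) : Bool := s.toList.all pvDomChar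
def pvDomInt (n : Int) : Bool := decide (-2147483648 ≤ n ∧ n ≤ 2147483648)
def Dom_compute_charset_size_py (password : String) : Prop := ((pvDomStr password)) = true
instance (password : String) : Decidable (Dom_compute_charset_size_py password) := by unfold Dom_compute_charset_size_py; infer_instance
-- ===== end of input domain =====

-- B is data-driven: per-character category ids collected into a set, then summed from a size table, instead of A's five whole-string scans and if-chain; same value, alternative decomposition.

-- string.punctuation
def pvPunct : List Char := "!\"#$%&'()*+,-./:;<=>?@[\\]^_`{|}~".toList

-- ===== PORT A =====
def compute_charset_size_py (password : String) : Int :=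
  let charset_size : Int := 0
  let has_lower := password.toList.any (fun c => PySem.Chars.islower c)
  let has_upper := password.toList.any (fun c => PySem.Chars.isupper c)
  let has_digit := password.toList.any (fun c => PySem.Chars.isdigit c)
  let has_special := password.toList.any (fun c => PySem.Chars.isIn [c] pvPunct)  -- c in string.punctuation
  let has_space := PySem.Chars.isIn [' '] password.toList                         -- " " in password
  let charset_size := if has_lower then charset_size + 26 else charset_size
  let charset_size := if has_upper then charset_size + 26 else charset_size
  let charset_size := if has_digit then charset_size + 10 else charset_size
  let charset_size := if has_special then charset_size + 32 else charset_size
  let charset_size := if has_space then charset_size + 1 else charset_size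
  let charset_size := if charset_size = 0 then 26 else charset_size
  charset_size

-- ===== PORT B =====
-- _SIZES
def pvSizes : List Int := [26, 26, 10, 32, 1]

-- _char_classes(c)
def pvCharClasses (c : Char) : List Int :=
  let ks : List Int := []
  let ks := if PySem.Chars.islower c then ks ++ [0] else ks
  let ks := if PySem.Chars.isupper c then ks ++ [1] else ks
  let ks := if PySem.Chars.isdigit c then ks ++ [2] else ks
  let ks := if PySem.Chars.isIn [c] pvPunct then ks ++ [3] else ks  -- c in string.punctuation
  let ks := if c == ' ' then ks ++ [4] else ks
  ks

def compute_charset_size_py_alt (password : String) : Int :=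
  let present : PySem.Set Int :=
    password.toList.foldl (fun s c => PySem.Set.update s (pvCharClasses c)) PySem.Set.empty
  -- sum(_SIZES[k] for k in present): summing over the set is order-independent
  let size : Int := (present.map (fun k => PySem.List.pyGetD pvSizes k 0)).sum
  if size = 0 then 26 else size

-- ===== PRECONDITION & SPEC =====
def Spec_compute_charset_size_py (password : String) (out : Int) : Prop := out = compute_charset_size_py_alt password
instance (password : String) (out : Int) : Decidable (Spec_compute_charset_size_py password out) := by unfold Spec_compute_charset_size_py; infer_instance

-- ===== CLAIM (what is proved, stated in full; the proofs are below) =====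
def Claim_equal_compute_charset_size_py : Prop := ∀ (password : String), Dom_compute_charset_size_py password → Spec_compute_charset_size_py password (compute_charset_size_py password)

-- ===== LEMMAS AND PROOFS =====

-- membership in the accumulated set of categories
theorem pv_mem_fold (cs : List Char) (s : PySem.Set Int) (k : Int) :
    k ∈ cs.foldl (fun s c => PySem.Set.update s (pvCharClasses c)) s ↔
      k ∈ s ∨ ∃ c ∈ cs, k ∈ pvCharClasses c := by
  induction cs generalizing s with
  | nil => simp
  | cons c cs ih =>
    rw [List.foldl_cons, ih]
    simp only [PySem.Set.mem_update, List.mem_cons]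
    constructor
    · rintro ((h | h) | ⟨c', hc', h⟩)
      exacts [Or.inl h, Or.inr ⟨c, Or.inl rfl, h⟩, Or.inr ⟨c', Or.inr hc', h⟩]
    · rintro (h | ⟨c', rfl | hc', h⟩)
      exacts [Or.inl (Or.inl h), Or.inl (Or.inr h), Or.inr ⟨c', hc', h⟩]

theorem pv_nodup_fold (cs : List Char) (s : PySem.Set Int) (h : s.Nodup) :
    (cs.foldl (fun s c => PySem.Set.update s (pvCharClasses c)) s).Nodup := by
  induction cs generalizing s with
  | nil => exact h
  | cons c cs ih => exact ih _ (PySem.Set.nodup_update _ _ h)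

-- 'c in string.punctuation' (single-char substring) is membership
theorem pv_isIn_singleton (c : Char) (cs : List Char) :
    PySem.Chars.isIn [c] cs = cs.contains c := by
  rcases h : cs.contains c with _ | _
  · simp only [List.contains_eq_mem, decide_eq_false_iff_not] at h
    rw [PySem.Chars.isIn_eq_false_iff]
    intro hinf
    exact h (hinf.mem (by simp))
  · simp only [List.contains_eq_mem, decide_eq_true_eq] at h
    rw [PySem.Chars.isIn_iff_infix]
    obtain ⟨l₁, l₂, rfl⟩ := List.append_of_mem h
    exact ⟨l₁, l₂, by simp⟩

theorem pv_space (cs : List Char) :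
    PySem.Chars.isIn [' '] cs = cs.any (fun c => c == ' ') := by
  rw [pv_isIn_singleton]
  induction cs with
  | nil => rfl
  | cons c cs ih =>
    simp only [List.contains_cons, List.any_cons, ← ih]
    simp [List.contains_eq_mem, BEq.comm]

theorem pv_mem_classes (c : Char) (k : Int) :
    k ∈ pvCharClasses c ↔
      (k = 0 ∧ PySem.Chars.islower c) ∨ (k = 1 ∧ PySem.Chars.isupper c) ∨
      (k = 2 ∧ PySem.Chars.isdigit c) ∨ (k = 3 ∧ PySem.Chars.isIn [c] pvPunct) ∨
      (k = 4 ∧ (c == ' ')) := by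
  unfold pvCharClasses
  split_ifs <;> simp_all

-- the accumulated set holds exactly the categories some character realises
theorem pv_present_iff (cs : List Char) (k : Int) :
    k ∈ cs.foldl (fun s c => PySem.Set.update s (pvCharClasses c)) PySem.Set.empty ↔
      k ∈ (([0, 1, 2, 3, 4] : List Int).filter (fun k =>
        (k == 0 && cs.any (fun c => PySem.Chars.islower c)) ||
        (k == 1 && cs.any (fun c => PySem.Chars.isupper c)) ||
        (k == 2 && cs.any (fun c => PySem.Chars.isdigit c)) ||
        (k == 3 && cs.any (fun c => PySem.Chars.isIn [c] pvPunct)) ||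
        (k == 4 && cs.any (fun c => c == ' ')))) := by
  rw [pv_mem_fold, List.mem_filter]
  simp only [PySem.Set.empty, List.not_mem_nil, false_or, pv_mem_classes, Bool.or_eq_true,
    Bool.and_eq_true, beq_iff_eq, List.any_eq_true, List.mem_cons]
  constructor
  · rintro ⟨c, hc, (⟨rfl, h⟩ | ⟨rfl, h⟩ | ⟨rfl, h⟩ | ⟨rfl, h⟩ | ⟨rfl, h⟩)⟩
    · exact ⟨by norm_num, Or.inl (Or.inl (Or.inl (Or.inl ⟨rfl, c, hc, h⟩)))⟩
    · exact ⟨by norm_num, Or.inl (Or.inl (Or.inl (Or.inr ⟨rfl, c, hc, h⟩)))⟩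
    · exact ⟨by norm_num, Or.inl (Or.inl (Or.inr ⟨rfl, c, hc, h⟩))⟩
    · exact ⟨by norm_num, Or.inl (Or.inr ⟨rfl, c, hc, h⟩)⟩
    · exact ⟨by norm_num, Or.inr ⟨rfl, c, hc, h⟩⟩
  · rintro ⟨-, ((((⟨rfl, c, hc, h⟩ | ⟨rfl, c, hc, h⟩) | ⟨rfl, c, hc, h⟩) | ⟨rfl, c, hc, h⟩) | ⟨rfl, c, hc, h⟩)⟩
    · exact ⟨c, hc, Or.inl ⟨rfl, h⟩⟩
    · exact ⟨c, hc, Or.inr (Or.inl ⟨rfl, h⟩)⟩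
    · exact ⟨c, hc, Or.inr (Or.inr (Or.inl ⟨rfl, h⟩))⟩
    · exact ⟨c, hc, Or.inr (Or.inr (Or.inr (Or.inl ⟨rfl, h⟩)))⟩
    · exact ⟨c, hc, Or.inr (Or.inr (Or.inr (Or.inr ⟨rfl, h⟩)))⟩

-- ===== VERDICT (by name: the statement is the Claim_ definition above) =====
theorem compute_charset_size_py_spec : Claim_equal_compute_charset_size_py := by
  intro password _
  show compute_charset_size_py password = compute_charset_size_py_alt password
  have hperm :
      (password.toList.foldl (fun s c => PySem.Set.update s (pvCharClasses c)) PySem.Set.empty).Perm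
      (([0, 1, 2, 3, 4] : List Int).filter (fun k =>
         (k == 0 && password.toList.any (fun c => PySem.Chars.islower c)) ||
         (k == 1 && password.toList.any (fun c => PySem.Chars.isupper c)) ||
         (k == 2 && password.toList.any (fun c => PySem.Chars.isdigit c)) ||
         (k == 3 && password.toList.any (fun c => PySem.Chars.isIn [c] pvPunct)) ||
         (k == 4 && password.toList.any (fun c => c == ' ')))) :=
    (List.perm_ext_iff_of_nodup (pv_nodup_fold _ _ List.nodup_nil)
      (List.Nodup.filter _ (by decide))).mpr (pv_present_iff password.toList)
  simp only [compute_charset_size_py, compute_charset_size_py_alt, pv_space]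
  rw [(hperm.map (fun k => PySem.List.pyGetD pvSizes k 0)).sum_eq]
  generalize password.toList.any (fun c => PySem.Chars.islower c) = b1
  generalize password.toList.any (fun c => PySem.Chars.isupper c) = b2
  generalize password.toList.any (fun c => PySem.Chars.isdigit c) = b3
  generalize password.toList.any (fun c => PySem.Chars.isIn [c] pvPunct) = b4
  generalize password.toList.any (fun c => c == ' ') = b5
  cases b1 <;> cases b2 <;> cases b3 <;> cases b4 <;> cases b5 <;> decide
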